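-- pv_equiv track=rewrite | github.com/Rom1009/Utilize-Transaction | final.py | compare1
-- ===== SOURCE A (Python) =====
-- def compare1(x,X,SUP):
--     count = 0
--     for i in X:
--         if SUP[str([x])] > SUP[str([i])] or  ( SUP[str([x])] == SUP[str([i])] and ord(x) > ord(i)) :
--             count +=1
--     if count == len(X):
--         return True
--     return False
-- ===== SOURCE B (Python) =====
-- def compare1(x, X, SUP):
--     # Reduce X to its lexicographic maximum (support, ord) pair, then one comparison.
--     if not X:
--         return True
--     m = max((SUP[str([i])], ord(i)) for i in X)
--     return (SUP[str([x])], ord(x)) > m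
-- ===== Notes on version B (the rewrite author's own statement) =====
-- stated objective: alternative
-- what changed: A counts how many elements x dominates and compares the count to len(X); B reduces X to its maximum (support, ord) pair and returns one strict lexicographic comparison against it (with the empty-X case returning True as max would raise).
-- outside the precondition, e.g. on compare1('ab', ['c'], {"['ab']": 5, "['c']": 1}): A returns True, B raises TypeError; on compare1('', ['a'], {"['']": 1, "['a']": 2}): A returns False, B raises TypeError
import Mathlib
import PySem

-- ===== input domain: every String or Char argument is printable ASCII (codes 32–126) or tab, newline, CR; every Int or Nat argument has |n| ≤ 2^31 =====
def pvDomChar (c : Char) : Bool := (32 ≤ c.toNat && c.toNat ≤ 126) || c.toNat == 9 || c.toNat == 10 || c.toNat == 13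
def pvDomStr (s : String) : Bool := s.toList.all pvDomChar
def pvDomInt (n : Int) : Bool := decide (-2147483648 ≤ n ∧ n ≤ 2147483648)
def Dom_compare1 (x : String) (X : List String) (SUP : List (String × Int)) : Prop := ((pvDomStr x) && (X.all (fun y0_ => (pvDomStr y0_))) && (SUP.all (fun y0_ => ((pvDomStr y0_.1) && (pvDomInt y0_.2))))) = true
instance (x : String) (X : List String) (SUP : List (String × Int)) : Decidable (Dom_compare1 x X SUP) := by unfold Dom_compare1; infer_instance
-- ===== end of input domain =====

-- B: same task as A, but by one reduction to the maximal (support, ord) pair followed by a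
-- single strict lexicographic comparison, instead of counting dominated elements (alternative
-- decomposition, same cost).

-- shared helpers: Python's str([s]) key (for the single chars Pre_ admits) and ord, and
-- first-match association-list lookup (dict lookup under the type convention)
def pvReprChars (cs : List Char) : List Char :=
  if cs = ['\''] then ['"', '\'', '"']
  else if cs = ['\\'] then ['\'', '\\', '\\', '\'']
  else if cs = ['\t'] then ['\'', '\\', 't', '\'']
  else if cs = ['\n'] then ['\'', '\\', 'n', '\'']
  else if cs = ['\r'] then ['\'', '\\', 'r', '\'']
  else '\'' :: cs ++ ['\'']

def pvKeyChars (s : String) : List Char := '[' :: pvReprChars s.toList ++ [']']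

def pvLook (SUP : List (String × Int)) (key : List Char) : Option Int :=
  match SUP.find? (fun p => p.1.toList == key) with
  | some p => some p.2
  | none => none

def pvOrd (s : String) : Int :=
  match s.toList with
  | c :: _ => (c.toNat : Int)
  | [] => 0

-- ===== PORT A =====
def compare1 (x : String) (X : List String) (SUP : List (String × Int)) : Bool :=
  let count : Int := X.foldl (fun count i =>
    if (pvLook SUP (pvKeyChars x)).getD 0 > (pvLook SUP (pvKeyChars i)).getD 0 ∨
       ((pvLook SUP (pvKeyChars x)).getD 0 = (pvLook SUP (pvKeyChars i)).getD 0 ∧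
        pvOrd x > pvOrd i)
    then count + 1 else count) 0
  if count = (X.length : Int) then true else false

-- ===== PORT B =====
def pvPairGt (a b : Int × Int) : Bool := decide (a.1 > b.1) || (decide (a.1 = b.1) && decide (a.2 > b.2))

def compare1_alt (x : String) (X : List String) (SUP : List (String × Int)) : Bool :=
  match X.map (fun i => ((pvLook SUP (pvKeyChars i)).getD 0, pvOrd i)) with
  | [] => true
  | p :: ps =>
    let m := ps.foldl (fun m q => if pvPairGt q m then q else m) p
    pvPairGt ((pvLook SUP (pvKeyChars x)).getD 0, pvOrd x) m

-- ===== PRECONDITION & SPEC =====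
-- Pre_ excludes inputs on which Python A raises (a key str([x]) or str([i]) missing from SUP
-- raises KeyError, ord of a non-single-character string raises TypeError); it also excludes
-- strings that are not exactly one character even when A's short-circuit happens to skip the
-- raising ord() call and A returns a value there (B evaluates ord unconditionally and raises).
def Pre_compare1 (x : String) (X : List String) (SUP : List (String × Int)) : Prop :=
  X = [] ∨
    ((x.toList.length = 1 ∧ (pvLook SUP (pvKeyChars x)).isSome = true) ∧
     ∀ i ∈ X, i.toList.length = 1 ∧ (pvLook SUP (pvKeyChars i)).isSome = true)

instance (x : String) (X : List String) (SUP : List (String × Int)) : Decidable (Pre_compare1 x X SUP) := by unfold Pre_compare1; infer_instance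

def pvWitness_compare1 : String × List String × (List (String × Int)) :=
  ("b", ["a", "c"], [("['a']", 1), ("['b']", 2), ("['c']", 0)])

def Spec_compare1 (x : String) (X : List String) (SUP : List (String × Int)) (out : Bool) : Prop := out = compare1_alt x X SUP
instance (x : String) (X : List String) (SUP : List (String × Int)) (out : Bool) : Decidable (Spec_compare1 x X SUP out) := by unfold Spec_compare1; infer_instance

-- ===== CLAIM (what is proved, stated in full; the proofs are below) =====
def Claim_equal_compare1 : Prop := ∀ (x : String) (X : List String) (SUP : List (String × Int)), Dom_compare1 x X SUP → Pre_compare1 x X SUP → Spec_compare1 x X SUP (compare1 x X SUP)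

-- ===== LEMMAS AND PROOFS =====

-- strict dominance of a max-of-two is dominance of both
theorem pvPairGt_max (v p q : Int × Int) :
    pvPairGt v (if pvPairGt q p then q else p) = (pvPairGt v p && pvPairGt v q) := by
  obtain ⟨a, b⟩ := v; obtain ⟨c, d⟩ := p; obtain ⟨e, f⟩ := q
  rw [Bool.eq_iff_iff]
  by_cases h : pvPairGt (e, f) (c, d) = true <;>
    simp only [pvPairGt, Bool.or_eq_true, Bool.and_eq_true, decide_eq_true_eq] at h <;>
    simp [h, pvPairGt, Bool.or_eq_true, Bool.and_eq_true, decide_eq_true_eq] <;>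
    omega

-- B's fold computes a pair dominated by v iff v dominates every listed pair
theorem foldlMax_gt (v : Int × Int) (ps : List (Int × Int)) (p : Int × Int) :
    pvPairGt v (ps.foldl (fun m q => if pvPairGt q m then q else m) p)
      = (pvPairGt v p && ps.all (pvPairGt v)) := by
  induction ps generalizing p with
  | nil => simp
  | cons q ps ih =>
      simp only [List.foldl_cons, List.all_cons, ih, pvPairGt_max, Bool.and_assoc]

-- A's counting loop, started from c, adds the number of elements satisfying the condition
theorem countLoop (P : String → Prop) [DecidablePred P] (X : List String) (c : Int) :
    X.foldl (fun count i => if P i then count + 1 else count) c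
      = c + (X.countP (fun i => decide (P i)) : Int) := by
  induction X generalizing c with
  | nil => simp
  | cons i X ih =>
      simp only [List.foldl_cons, List.countP_cons, decide_eq_true_eq]
      split_ifs with h
      · rw [ih]
        push_cast
        ring
      · simp [ih]

-- A's result is "x dominates every element of X"
theorem compare1_eq_all (x : String) (X : List String) (SUP : List (String × Int)) :
    compare1 x X SUP
      = X.all (fun i => pvPairGt ((pvLook SUP (pvKeyChars x)).getD 0, pvOrd x)
          ((pvLook SUP (pvKeyChars i)).getD 0, pvOrd i)) := by
  unfold compare1
  rw [countLoop, zero_add]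
  have hfun : (fun i => decide
      ((pvLook SUP (pvKeyChars x)).getD 0 > (pvLook SUP (pvKeyChars i)).getD 0 ∨
       ((pvLook SUP (pvKeyChars x)).getD 0 = (pvLook SUP (pvKeyChars i)).getD 0 ∧
        pvOrd x > pvOrd i)))
      = (fun i => pvPairGt ((pvLook SUP (pvKeyChars x)).getD 0, pvOrd x)
          ((pvLook SUP (pvKeyChars i)).getD 0, pvOrd i)) := by
    funext i
    simp [pvPairGt, Bool.decide_or, Bool.decide_and]
  rw [hfun]
  dsimp only
  split_ifs with h
  · exact (List.all_eq_true.mpr (List.countP_eq_length.mp (Nat.cast_inj.mp h))).symm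
  · by_cases hall : (X.all (fun i => pvPairGt ((pvLook SUP (pvKeyChars x)).getD 0, pvOrd x)
        ((pvLook SUP (pvKeyChars i)).getD 0, pvOrd i))) = true
    · have hc := List.countP_eq_length.mpr (List.all_eq_true.mp hall)
      exact absurd (by exact_mod_cast hc) h
    · rw [Bool.not_eq_true] at hall
      rw [hall]

-- B's result is the same "x dominates every element of X"
theorem compare1_alt_eq_all (x : String) (X : List String) (SUP : List (String × Int)) :
    compare1_alt x X SUP
      = X.all (fun i => pvPairGt ((pvLook SUP (pvKeyChars x)).getD 0, pvOrd x)
          ((pvLook SUP (pvKeyChars i)).getD 0, pvOrd i)) := by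
  cases X with
  | nil => rfl
  | cons i X =>
      simp [compare1_alt, foldlMax_gt, List.all_map, Function.comp_def]

-- ===== VERDICT (by name: the statement is the Claim_ definition above) =====
theorem compare1_spec : Claim_equal_compare1 := by
  intro x X SUP _ _
  rw [Spec_compare1, compare1_eq_all, compare1_alt_eq_all]
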